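-- pv_equiv track=rewrite | github.com/LuisAlejandro/pipsalabim | pipsalabim/api/report.py | fill_with_pypi
-- ===== SOURCE A (Python) =====
-- def fill_with_pypi(datadict, pypidata):
--     """
--     Fill ``datadict`` with modules from ``pypidata`` if found.
--
--     .. _PyPIContents: https://github.com/LuisAlejandro/pypicontents
--
--     :param datadict: a dictionary containing modules as keys and
--                      a list as values.
--     :param pypidata: a dictionary with the `PyPIContents`_ database.
--     :return: an updated dictionary containing information about the location
--              of each imported module.
--
--     .. versionadded:: 0.1.0
--     """
--     for module, where in datadict.items():
--         if where:
--             continue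
--         for package, data in pypidata.items():
--             if module not in data['modules']:
--                 continue
--             datadict[module].append(package)
--     return datadict
-- ===== SOURCE B (Python) =====
-- def fill_with_pypi(datadict, pypidata):
--     """Inverted index version: one pass over pypidata builds module -> packages,
--     then each unresolved module is a single lookup. Note: unlike A, B does not
--     mutate datadict in place; the return value is the same."""
--     index = {}
--     for package, data in pypidata.items():
--         for module in dict.fromkeys(data.get('modules', ())):
--             index.setdefault(module, []).append(package)
--     return {module: (where if where else index.get(module, []))
--             for module, where in datadict.items()}
-- ===== Notes on version B (the rewrite author's own statement) =====
-- stated objective: alternative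
-- what changed: Instead of rescanning every PyPI package's module list for each unresolved module, B builds an inverted index module->packages in one pass over pypidata and answers each unresolved module with a single dict lookup; Pre_ additionally excludes assoc lists with duplicate keys (not representable as Python dicts) and the inputs where A raises KeyError ('modules' key missing while some module is unresolved).
import Mathlib
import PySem

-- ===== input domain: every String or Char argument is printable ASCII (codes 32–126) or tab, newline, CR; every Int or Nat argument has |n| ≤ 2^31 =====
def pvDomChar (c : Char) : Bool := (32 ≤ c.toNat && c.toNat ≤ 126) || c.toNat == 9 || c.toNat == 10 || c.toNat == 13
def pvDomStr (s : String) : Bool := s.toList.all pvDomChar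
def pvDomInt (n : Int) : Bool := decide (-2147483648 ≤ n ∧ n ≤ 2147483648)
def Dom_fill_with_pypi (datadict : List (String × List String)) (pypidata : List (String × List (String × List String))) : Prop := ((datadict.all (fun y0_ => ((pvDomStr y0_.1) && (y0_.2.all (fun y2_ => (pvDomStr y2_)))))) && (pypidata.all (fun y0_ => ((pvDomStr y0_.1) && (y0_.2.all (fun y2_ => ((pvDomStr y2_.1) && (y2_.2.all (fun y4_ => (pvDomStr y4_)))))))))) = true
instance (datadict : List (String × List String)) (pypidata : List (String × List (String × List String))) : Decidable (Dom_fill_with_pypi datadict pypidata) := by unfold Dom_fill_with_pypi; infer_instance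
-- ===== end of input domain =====

-- B replaces A's rescan of every package's module list per unresolved module by an
-- inverted index module -> packages built in one pass over pypidata, then one lookup per module.
-- Python A mutates datadict in place and returns it; B builds a fresh dict: the
-- equivalence proved here is about the RETURN value.

-- ===== PORT A =====
-- data['modules'] : first-match lookup in the inner association list ([] default is
-- never reached inside Pre_, where the key is present whenever the loop runs)
def pvModsOf (data : List (String × List String)) : List String :=
  ((data.find? (fun p => p.1 == "modules")).map (fun p => p.2)).getD []

-- datadict[module].append(package): append to the value of the first binding of k
def pvAppendAt (d : List (String × List String)) (k : String) (p : String) :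
    List (String × List String) :=
  match d with
  | [] => []
  | (k', v) :: rest => if k' == k then (k', v ++ [p]) :: rest else (k', v) :: pvAppendAt rest k p

def fill_with_pypi (datadict : List (String × List String)) (pypidata : List (String × List (String × List String))) : List (String × List String) :=
  datadict.foldl (fun d mw =>
    if mw.2 ≠ [] then d
    else pypidata.foldl (fun d' pd =>
      if mw.1 ∈ pvModsOf pd.2 then pvAppendAt d' mw.1 pd.1 else d') d) datadict

-- ===== PORT B =====
-- index.setdefault(m, []).append(p)
def pvIndexAdd (idx : List (String × List String)) (m : String) (p : String) :
    List (String × List String) :=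
  match idx with
  | [] => [(m, [p])]
  | (k, v) :: rest => if k == m then (k, v ++ [p]) :: rest else (k, v) :: pvIndexAdd rest m p

-- one pass over pypidata; dict.fromkeys(...) = PySem.Set.ofList (dedupe, order kept)
def pvBuildIndex (pypidata : List (String × List (String × List String))) :
    List (String × List String) :=
  pypidata.foldl (fun idx pd =>
    (PySem.Set.ofList (pvModsOf pd.2)).foldl (fun idx' m => pvIndexAdd idx' m pd.1) idx) []

def fill_with_pypi_alt (datadict : List (String × List String)) (pypidata : List (String × List (String × List String))) : List (String × List String) :=
  let idx := pvBuildIndex pypidata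
  datadict.map (fun mw =>
    (mw.1, if mw.2 ≠ [] then mw.2
           else ((idx.find? (fun p => p.1 == mw.1)).map (fun p => p.2)).getD []))

-- ===== PRECONDITION & SPEC =====
-- Pre_ excludes (a) association lists with duplicate keys in any of the three dict
-- positions — those do not represent any Python dict, so A's first-match behaviour
-- there is an artefact of the encoding — and (b) exactly the inputs on which Python A
-- raises KeyError: some module has an empty 'where' list (so the inner loop runs) while
-- some package's dict lacks the key 'modules'.
def Pre_fill_with_pypi (datadict : List (String × List String)) (pypidata : List (String × List (String × List String))) : Prop :=
  (datadict.map Prod.fst).Nodup ∧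
  (pypidata.map Prod.fst).Nodup ∧
  (∀ pd ∈ pypidata, (pd.2.map Prod.fst).Nodup) ∧
  ((∃ mw ∈ datadict, mw.2 = []) →
    ∀ pd ∈ pypidata, (pd.2.find? (fun p => p.1 == "modules")).isSome)
instance (datadict : List (String × List String)) (pypidata : List (String × List (String × List String))) : Decidable (Pre_fill_with_pypi datadict pypidata) := by unfold Pre_fill_with_pypi; infer_instance

def pvWitness_fill_with_pypi : (List (String × List String)) × (List (String × List (String × List String))) :=
  ([("os", ["stdlib"]), ("requests", [])],
   [("requests", [("modules", ["requests"])]), ("bar", [("modules", ["foo"])])])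

def Spec_fill_with_pypi (datadict : List (String × List String)) (pypidata : List (String × List (String × List String))) (out : List (String × List String)) : Prop := out = fill_with_pypi_alt datadict pypidata
instance (datadict : List (String × List String)) (pypidata : List (String × List (String × List String))) (out : List (String × List String)) : Decidable (Spec_fill_with_pypi datadict pypidata out) := by unfold Spec_fill_with_pypi; infer_instance

-- ===== CLAIM (what is proved, stated in full; the proofs are below) =====
def Claim_equal_fill_with_pypi : Prop := ∀ (datadict : List (String × List String)) (pypidata : List (String × List (String × List String))), Dom_fill_with_pypi datadict pypidata → Pre_fill_with_pypi datadict pypidata → Spec_fill_with_pypi datadict pypidata (fill_with_pypi datadict pypidata)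

-- ===== LEMMAS AND PROOFS =====

-- the packages (in pypidata order) whose module list contains m
def pvPkgs (pypidata : List (String × List (String × List String))) (m : String) : List String :=
  (pypidata.filter (fun pd => decide (m ∈ pvModsOf pd.2))).map Prod.fst

def pvAppendMany (d : List (String × List String)) (k : String) (l : List String) :
    List (String × List String) :=
  match d with
  | [] => []
  | (k', v) :: rest => if k' == k then (k', v ++ l) :: rest else (k', v) :: pvAppendMany rest k l

theorem pvAppendMany_nil (d : List (String × List String)) (k : String) :
    pvAppendMany d k [] = d := by
  induction d with
  | nil => rfl
  | cons hd tl ih =>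
    obtain ⟨k', v⟩ := hd
    simp only [pvAppendMany]
    split <;> simp [ih]

theorem pvAppendAt_appendMany (d : List (String × List String)) (k : String)
    (l : List String) (p : String) :
    pvAppendAt (pvAppendMany d k l) k p = pvAppendMany d k (l ++ [p]) := by
  induction d with
  | nil => rfl
  | cons hd tl ih =>
    obtain ⟨k', v⟩ := hd
    simp only [pvAppendMany]
    by_cases h : k' == k
    · simp [pvAppendAt, h]
    · simp [pvAppendAt, h, ih]

theorem pvInnerA (pypidata : List (String × List (String × List String))) (m : String) :
    ∀ (l : List String) (d : List (String × List String)),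
    pypidata.foldl (fun d' pd =>
      if m ∈ pvModsOf pd.2 then pvAppendAt d' m pd.1 else d') (pvAppendMany d m l)
    = pvAppendMany d m (l ++ pvPkgs pypidata m) := by
  induction pypidata with
  | nil => intro l d; simp [pvPkgs]
  | cons pd rest ih =>
    intro l d
    simp only [List.foldl_cons]
    by_cases h : m ∈ pvModsOf pd.2
    · rw [if_pos h, pvAppendAt_appendMany, ih]
      simp [pvPkgs, List.filter_cons, h]
    · rw [if_neg h, ih]
      simp [pvPkgs, List.filter_cons, h]

theorem pvAppendMany_notin (pre rest : List (String × List String)) (m : String)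
    (w l : List String) (h : m ∉ pre.map Prod.fst) :
    pvAppendMany (pre ++ (m, w) :: rest) m l = pre ++ (m, w ++ l) :: rest := by
  induction pre with
  | nil =>
    show pvAppendMany ((m, w) :: rest) m l = (m, w ++ l) :: rest
    rw [pvAppendMany, if_pos (by simp)]
  | cons hd tl ih =>
    obtain ⟨k, v⟩ := hd
    simp only [List.map_cons, List.mem_cons, not_or] at h
    simp only [List.cons_append, pvAppendMany]
    rw [if_neg (by simpa using Ne.symm h.1), ih h.2]

theorem pvOuterA (pypidata : List (String × List (String × List String))) :
    ∀ (ds pre : List (String × List String)),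
    (ds.map Prod.fst).Nodup →
    (∀ k ∈ ds.map Prod.fst, k ∉ pre.map Prod.fst) →
    ds.foldl (fun d mw =>
      if mw.2 ≠ [] then d
      else pypidata.foldl (fun d' pd =>
        if mw.1 ∈ pvModsOf pd.2 then pvAppendAt d' mw.1 pd.1 else d') d) (pre ++ ds)
    = pre ++ ds.map (fun mw => (mw.1, if mw.2 ≠ [] then mw.2 else pvPkgs pypidata mw.1)) := by
  intro ds
  induction ds with
  | nil => intro pre _ _; simp
  | cons hd tl ih =>
    intro pre hnd hdisj
    obtain ⟨m, w⟩ := hd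
    simp only [List.map_cons, List.nodup_cons] at hnd
    have hmpre : m ∉ pre.map Prod.fst := hdisj m (by simp)
    have hdisj' : ∀ k ∈ tl.map Prod.fst, k ∉ (pre ++ [(m, if w ≠ [] then w else pvPkgs pypidata m)]).map Prod.fst := by
      intro k hk
      simp only [List.map_append, List.mem_append, List.map_cons, List.map_nil,
        List.mem_cons, List.not_mem_nil, or_false, not_or]
      exact ⟨hdisj k (by simp [hk]), fun he => hnd.1 (he ▸ hk)⟩
    simp only [List.foldl_cons]
    by_cases hw : w = []
    · subst hw
      have h0 : (pre ++ ((m, ([] : List String)) :: tl)) =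
          pvAppendMany (pre ++ ((m, ([] : List String)) :: tl)) m [] := (pvAppendMany_nil _ _).symm
      rw [if_neg (by simp), h0, pvInnerA, pvAppendMany_notin _ _ _ _ _ hmpre]
      have := ih (pre ++ [(m, ([] : List String) ++ ([] ++ pvPkgs pypidata m))]) hnd.2 (by simpa using hdisj')
      simpa using this
    · rw [if_pos (by simpa using hw)]
      have := ih (pre ++ [(m, w)]) hnd.2 (by simpa [hw] using hdisj')
      simpa [hw] using this

theorem pvA_eq (datadict : List (String × List String))
    (pypidata : List (String × List (String × List String)))
    (hnd : (datadict.map Prod.fst).Nodup) :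
    fill_with_pypi datadict pypidata
    = datadict.map (fun mw => (mw.1, if mw.2 ≠ [] then mw.2 else pvPkgs pypidata mw.1)) := by
  have := pvOuterA pypidata datadict [] hnd (by simp)
  simpa [fill_with_pypi] using this

-- B side

def pvFindVal (idx : List (String × List String)) (m : String) : List String :=
  ((idx.find? (fun p => p.1 == m)).map (fun p => p.2)).getD []

theorem pvFindVal_cons (k : String) (v : List String) (rest : List (String × List String))
    (m : String) :
    pvFindVal ((k, v) :: rest) m = if k = m then v else pvFindVal rest m := by
  by_cases h : k = m
  · subst h
    simp [pvFindVal, List.find?_cons_of_pos]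
  · rw [pvFindVal, List.find?_cons_of_neg (by simpa using h)]
    simp [pvFindVal, h]

theorem pvFindVal_indexAdd (idx : List (String × List String)) (m' p m : String) :
    pvFindVal (pvIndexAdd idx m' p) m
    = if m = m' then pvFindVal idx m ++ [p] else pvFindVal idx m := by
  induction idx with
  | nil =>
    simp only [pvIndexAdd, pvFindVal_cons]
    by_cases h : m = m'
    · simp [pvFindVal, h]
    · simp [pvFindVal, h, Ne.symm h]
  | cons hd tl ih =>
    obtain ⟨k, v⟩ := hd
    simp only [pvIndexAdd]
    by_cases hk : k = m'
    · rw [if_pos (by simpa using hk), pvFindVal_cons, pvFindVal_cons]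
      subst hk
      by_cases h : k = m
      · subst h; simp
      · simp [h, Ne.symm h]
    · rw [if_neg (by simpa using hk), pvFindVal_cons, pvFindVal_cons, ih]
      by_cases h : k = m
      · subst h
        simp [hk, Ne.symm hk]
      · simp [h]

theorem pvInnerB (p m : String) :
    ∀ (ss : List String) (idx : List (String × List String)), ss.Nodup →
    pvFindVal (ss.foldl (fun idx' m' => pvIndexAdd idx' m' p) idx) m
    = pvFindVal idx m ++ (if m ∈ ss then [p] else []) := by
  intro ss
  induction ss with
  | nil => intro idx _; simp
  | cons s rest ih =>
    intro idx hnd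
    simp only [List.nodup_cons] at hnd
    simp only [List.foldl_cons]
    rw [ih _ hnd.2, pvFindVal_indexAdd]
    by_cases h : m = s
    · subst h
      simp [hnd.1]
    · simp [h, List.mem_cons]

theorem pvBuildB (m : String) :
    ∀ (ps : List (String × List (String × List String))) (idx : List (String × List String)),
    pvFindVal (ps.foldl (fun idx pd =>
      (PySem.Set.ofList (pvModsOf pd.2)).foldl (fun idx' m' => pvIndexAdd idx' m' pd.1) idx) idx) m
    = pvFindVal idx m ++ pvPkgs ps m := by
  intro ps
  induction ps with
  | nil => intro idx; simp [pvPkgs]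
  | cons pd rest ih =>
    intro idx
    simp only [List.foldl_cons]
    rw [ih, pvInnerB _ _ _ _ (PySem.Set.nodup_ofList _)]
    by_cases h : m ∈ pvModsOf pd.2
    · simp [pvPkgs, List.filter_cons, h, PySem.Set.mem_ofList]
    · simp [pvPkgs, List.filter_cons, h, PySem.Set.mem_ofList]

theorem pvB_eq (datadict : List (String × List String))
    (pypidata : List (String × List (String × List String))) :
    fill_with_pypi_alt datadict pypidata
    = datadict.map (fun mw => (mw.1, if mw.2 ≠ [] then mw.2 else pvPkgs pypidata mw.1)) := by
  unfold fill_with_pypi_alt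
  apply List.map_congr_left
  intro mw _
  by_cases hw : mw.2 = []
  · have : pvFindVal (pvBuildIndex pypidata) mw.1 = pvPkgs pypidata mw.1 := by
      have := pvBuildB mw.1 pypidata []
      simpa [pvBuildIndex, pvFindVal] using this
    simp only [hw]
    simpa [pvFindVal] using this
  · simp [hw]

-- ===== VERDICT (by name: the statement is the Claim_ definition above) =====
theorem fill_with_pypi_spec : Claim_equal_fill_with_pypi := by
  intro datadict pypidata _hdom hpre
  unfold Spec_fill_with_pypi
  rw [pvA_eq datadict pypidata hpre.1, pvB_eq]
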